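-- pv_equiv track=rewrite | github.com/August000/autognosis | api/graph_queries.py | search_nodes
-- ===== SOURCE A (Python) =====
-- def search_nodes(query: str, graph: dict) -> list[dict]:
--     """Fuzzy search nodes by label. Returns best matches sorted by relevance."""
--     query_lower = query.lower().strip()
--     if not query_lower:
--         return []
--
--     scored = []
--     for node in graph["nodes"]:
--         label = (node.get("label") or "").lower()
--         if not label:
--             continue
--         # Exact match
--         if label == query_lower:
--             scored.append((0, node))
--         # Starts with
--         elif label.startswith(query_lower):
--             scored.append((1, node))
--         # Contains
--         elif query_lower in label:
--             scored.append((2, node))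
--         # Any query word appears in label
--         elif any(w in label for w in query_lower.split()):
--             scored.append((3, node))
--
--     scored.sort(key=lambda x: x[0])
--     return [s[1] for s in scored[:10]]
-- ===== SOURCE B (Python) =====
-- def search_nodes(query: str, graph: dict) -> list[dict]:
--     """Fuzzy search nodes by label: bucket by match quality, no sort needed."""
--     q = query.lower().strip()
--     if not q:
--         return []
--     words = q.split()
--     exact, starts, contains, wordm = [], [], [], []
--     for node in graph["nodes"]:
--         label = (node.get("label") or "").lower()
--         if not label:
--             continue
--         if label == q:
--             exact.append(node)
--         elif label.startswith(q):
--             starts.append(node)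
--         elif q in label:
--             contains.append(node)
--         elif any(w in label for w in words):
--             wordm.append(node)
--     return (exact + starts + contains + wordm)[:10]
-- ===== Notes on version B (the rewrite author's own statement) =====
-- stated objective: simpler
-- what changed: B distributes nodes into four buckets (exact, starts-with, contains, word-match) during the single pass and returns the first 10 of their concatenation, eliminating A's score tuples and its final stable comparison sort.
import Mathlib
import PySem

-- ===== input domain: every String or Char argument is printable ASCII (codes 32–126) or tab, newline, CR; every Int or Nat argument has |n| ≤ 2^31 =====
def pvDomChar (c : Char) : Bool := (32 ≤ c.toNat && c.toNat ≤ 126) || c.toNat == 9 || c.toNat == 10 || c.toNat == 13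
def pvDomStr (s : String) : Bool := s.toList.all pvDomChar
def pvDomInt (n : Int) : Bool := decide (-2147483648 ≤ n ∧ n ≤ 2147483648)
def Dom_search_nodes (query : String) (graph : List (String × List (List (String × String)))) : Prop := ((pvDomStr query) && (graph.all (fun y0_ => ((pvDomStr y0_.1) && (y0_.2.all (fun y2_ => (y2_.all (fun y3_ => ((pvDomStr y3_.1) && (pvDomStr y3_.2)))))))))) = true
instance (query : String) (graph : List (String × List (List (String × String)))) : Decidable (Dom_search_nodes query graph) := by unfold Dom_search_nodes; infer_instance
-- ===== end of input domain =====

-- B replaces A's final stable comparison sort by four score buckets filled during the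
-- single pass and concatenated in score order (same return value; no side effects claimed —
-- A sorts only its local list).

-- ===== PORT A =====
-- loop body of A's 'for node in graph["nodes"]' (scored.append((k, node)) in the matching branch)
def pvStepA (query_lower : String) (scored : List (Int × List (String × String)))
    (node : List (String × String)) : List (Int × List (String × String)) :=
  -- '(node.get("label") or "")': the 'or ""' maps both None and "" to "", i.e. getD with default ""
  let label := PySem.Str.lower (PySem.Dict.getD ⟨node⟩ "label" "")
  if label == "" then scored
  else if label == query_lower then scored ++ [((0 : Int), node)]
  else if PySem.Str.startswith label query_lower then scored ++ [((1 : Int), node)]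
  else if PySem.Str.isIn query_lower label then scored ++ [((2 : Int), node)]
  else if (PySem.Str.split₀ query_lower).any (fun w => PySem.Str.isIn w label) then scored ++ [((3 : Int), node)]
  else scored

def search_nodes (query : String) (graph : List (String × List (List (String × String)))) : List (List (String × String)) :=
  let query_lower := PySem.Str.strip (PySem.Str.lower query)
  if query_lower == "" then []
  else
    -- graph["nodes"]: KeyError (none) excluded by Pre_search_nodes
    let nodes := (PySem.Dict.get? ⟨graph⟩ "nodes").getD []
    let scored := nodes.foldl (pvStepA query_lower) []
    let scored := PySem.List.sorted scored (fun x => x.1)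
    (PySem.List.slice scored none (some 10)).map (fun s => s.2)

-- ===== PORT B =====
-- loop body of B's pass: append the node to the bucket of its match quality
def pvStepB (q : String)
    (b : List (List (String × String)) × List (List (String × String)) × List (List (String × String)) × List (List (String × String)))
    (node : List (String × String)) :
    List (List (String × String)) × List (List (String × String)) × List (List (String × String)) × List (List (String × String)) :=
  let (exact, starts, contains, wordm) := b
  let label := PySem.Str.lower (PySem.Dict.getD ⟨node⟩ "label" "")
  if label == "" then (exact, starts, contains, wordm)
  else if label == q then (exact ++ [node], starts, contains, wordm)
  else if PySem.Str.startswith label q then (exact, starts ++ [node], contains, wordm)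
  else if PySem.Str.isIn q label then (exact, starts, contains ++ [node], wordm)
  else if (PySem.Str.split₀ q).any (fun w => PySem.Str.isIn w label) then (exact, starts, contains, wordm ++ [node])
  else (exact, starts, contains, wordm)

def search_nodes_alt (query : String) (graph : List (String × List (List (String × String)))) : List (List (String × String)) :=
  let q := PySem.Str.strip (PySem.Str.lower query)
  if q == "" then []
  else
    let nodes := (PySem.Dict.get? ⟨graph⟩ "nodes").getD []
    let b := nodes.foldl (pvStepB q) ([], [], [], [])
    PySem.List.slice (b.1 ++ b.2.1 ++ b.2.2.1 ++ b.2.2.2) none (some 10)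

-- ===== PRECONDITION & SPEC =====
-- Pre_ excludes exactly the inputs where Python raises KeyError: graph has no "nodes" key and
-- the stripped lowered query is nonempty (with an empty query both return [] before the lookup).
def Pre_search_nodes (query : String) (graph : List (String × List (List (String × String)))) : Prop :=
  PySem.Str.strip (PySem.Str.lower query) = "" ∨ (PySem.Dict.get? ⟨graph⟩ "nodes").isSome = true
instance (query : String) (graph : List (String × List (List (String × String)))) : Decidable (Pre_search_nodes query graph) := by unfold Pre_search_nodes; infer_instance
def pvWitness_search_nodes : String × (List (String × List (List (String × String)))) :=
  ("Ab", [("nodes", [[("label", "ab c")], [("id", "1")]])])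

def Spec_search_nodes (query : String) (graph : List (String × List (List (String × String)))) (out : List (List (String × String))) : Prop := out = search_nodes_alt query graph
instance (query : String) (graph : List (String × List (List (String × String)))) (out : List (List (String × String))) : Decidable (Spec_search_nodes query graph out) := by unfold Spec_search_nodes; infer_instance

-- ===== CLAIM (what is proved, stated in full; the proofs are below) =====
def Claim_equal_search_nodes : Prop := ∀ (query : String) (graph : List (String × List (List (String × String)))), Dom_search_nodes query graph → Pre_search_nodes query graph → Spec_search_nodes query graph (search_nodes query graph)

-- ===== LEMMAS AND PROOFS =====

-- what one node contributes to A's scored list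
def pvGA (q : String) (node : List (String × String)) : List (Int × List (String × String)) :=
  let label := PySem.Str.lower (PySem.Dict.getD ⟨node⟩ "label" "")
  if label == "" then []
  else if label == q then [((0 : Int), node)]
  else if PySem.Str.startswith label q then [((1 : Int), node)]
  else if PySem.Str.isIn q label then [((2 : Int), node)]
  else if (PySem.Str.split₀ q).any (fun w => PySem.Str.isIn w label) then [((3 : Int), node)]
  else []

-- what one node contributes to B's bucket k
def pvGB (k : Int) (q : String) (node : List (String × String)) : List (List (String × String)) :=
  ((pvGA q node).filter (fun x => x.1 == k)).map (fun s => s.2)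

theorem pvStepA_eq (q : String) (scored : List (Int × List (String × String)))
    (node : List (String × String)) : pvStepA q scored node = scored ++ pvGA q node := by
  simp only [pvStepA, pvGA]
  split_ifs <;> simp

theorem pvFoldA (q : String) (ns : List (List (String × String)))
    (acc : List (Int × List (String × String))) :
    ns.foldl (pvStepA q) acc = acc ++ ns.flatMap (pvGA q) := by
  rw [show pvStepA q = (fun acc x => acc ++ pvGA q x) from
        funext fun a => funext fun n => pvStepA_eq q a n,
      PySem.List.foldl_append_eq_flatMap]

theorem pvStepB_eq (q : String) (e s c w : List (List (String × String)))
    (node : List (String × String)) :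
    pvStepB q (e, s, c, w) node =
      (e ++ pvGB 0 q node, s ++ pvGB 1 q node, c ++ pvGB 2 q node, w ++ pvGB 3 q node) := by
  simp only [pvStepB, pvGB, pvGA]
  split_ifs <;> simp

theorem pvFoldB (q : String) (ns : List (List (String × String)))
    (e s c w : List (List (String × String))) :
    ns.foldl (pvStepB q) (e, s, c, w) =
      (e ++ ns.flatMap (pvGB 0 q), s ++ ns.flatMap (pvGB 1 q),
       c ++ ns.flatMap (pvGB 2 q), w ++ ns.flatMap (pvGB 3 q)) := by
  induction ns generalizing e s c w with
  | nil => simp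
  | cons n t ih => rw [List.foldl_cons, pvStepB_eq, ih]; simp

theorem pvGA_key (q : String) (node : List (String × String)) :
    ∀ x ∈ pvGA q node, x.1 = 0 ∨ x.1 = 1 ∨ x.1 = 2 ∨ x.1 = 3 := by
  intro x hx
  simp only [pvGA] at hx
  split_ifs at hx <;> simp_all

theorem pvInsertBy_middle {α : Type} (before : α → α → Bool) (x : α) (A B : List α)
    (hA : ∀ a ∈ A, before x a = false) (hB : ∀ b ∈ B, before x b = true) :
    PySem.List.insertBy before x (A ++ B) = A ++ x :: B := by
  induction A with
  | nil =>
      cases B with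
      | nil => simp [PySem.List.insertBy]
      | cons b bs => simp [PySem.List.insertBy, hB b (by simp)]
  | cons a as ih =>
      simp only [List.cons_append, PySem.List.insertBy, hA a (by simp), Bool.false_eq_true,
        if_false]
      exact congrArg (a :: ·) (ih (fun a' ha' => hA a' (by simp [ha'])))

theorem pvSort_buckets {α : Type} (l : List (Int × α))
    (h : ∀ x ∈ l, x.1 = 0 ∨ x.1 = 1 ∨ x.1 = 2 ∨ x.1 = 3) :
    PySem.List.sorted l (fun x => x.1) =
      l.filter (fun x => x.1 == 0) ++ (l.filter (fun x => x.1 == 1) ++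
      (l.filter (fun x => x.1 == 2) ++ l.filter (fun x => x.1 == 3))) := by
  induction l using List.reverseRecOn with
  | nil => simp [PySem.List.sorted_eq_foldl_insertBy]
  | append_singleton t x ih =>
    have ht : ∀ y ∈ t, y.1 = 0 ∨ y.1 = 1 ∨ y.1 = 2 ∨ y.1 = 3 := fun y hy => h y (by simp [hy])
    have hmem : ∀ (k : Int), ∀ a ∈ t.filter (fun y => y.1 == k), a.1 = k := by
      intro k a ha
      simpa using (List.mem_filter.mp ha).2
    have hsort : PySem.List.sorted (t ++ [x]) (fun y => y.1) =
        PySem.List.insertBy (fun a b => decide (a.1 < b.1)) x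
          (PySem.List.sorted t (fun y => y.1)) := by
      rw [PySem.List.sorted_eq_foldl_insertBy, List.foldl_append,
        ← PySem.List.sorted_eq_foldl_insertBy]
      rfl
    rw [hsort, ih ht]
    rcases h x (by simp) with hx | hx | hx | hx
    · rw [show t.filter (fun y => y.1 == (0:Int)) ++
            (t.filter (fun y => y.1 == 1) ++ (t.filter (fun y => y.1 == 2) ++ t.filter (fun y => y.1 == 3))) =
          t.filter (fun y => y.1 == (0:Int)) ++
            (t.filter (fun y => y.1 == 1) ++ (t.filter (fun y => y.1 == 2) ++ t.filter (fun y => y.1 == 3))) from rfl,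
        pvInsertBy_middle _ x _ _
          (fun a ha => by simp [hmem 0 a ha, hx])
          (fun b hb => by
            rcases List.mem_append.mp hb with h1 | h1
            · simp [hmem 1 b h1, hx]
            · rcases List.mem_append.mp h1 with h2 | h2
              · simp [hmem 2 b h2, hx]
              · simp [hmem 3 b h2, hx])]
      simp [List.filter_append, List.filter, hx]
    · rw [← List.append_assoc,
        pvInsertBy_middle _ x _ _
          (fun a ha => by
            rcases List.mem_append.mp ha with h1 | h1
            · simp [hmem 0 a h1, hx]
            · simp [hmem 1 a h1, hx])
          (fun b hb => by
            rcases List.mem_append.mp hb with h1 | h1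
            · simp [hmem 2 b h1, hx]
            · simp [hmem 3 b h1, hx])]
      simp [List.filter_append, List.filter, hx]
    · rw [show t.filter (fun y => y.1 == (0:Int)) ++
            (t.filter (fun y => y.1 == 1) ++ (t.filter (fun y => y.1 == 2) ++ t.filter (fun y => y.1 == 3))) =
          (t.filter (fun y => y.1 == (0:Int)) ++ (t.filter (fun y => y.1 == 1) ++ t.filter (fun y => y.1 == 2))) ++
            t.filter (fun y => y.1 == 3) from by simp [List.append_assoc],
        pvInsertBy_middle _ x _ _
          (fun a ha => by
            rcases List.mem_append.mp ha with h1 | h1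
            · simp [hmem 0 a h1, hx]
            · rcases List.mem_append.mp h1 with h2 | h2
              · simp [hmem 1 a h2, hx]
              · simp [hmem 2 a h2, hx])
          (fun b hb => by simp [hmem 3 b hb, hx])]
      simp [List.filter_append, List.filter, hx]
    · rw [show t.filter (fun y => y.1 == (0:Int)) ++
            (t.filter (fun y => y.1 == 1) ++ (t.filter (fun y => y.1 == 2) ++ t.filter (fun y => y.1 == 3))) =
          (t.filter (fun y => y.1 == (0:Int)) ++ (t.filter (fun y => y.1 == 1) ++
            (t.filter (fun y => y.1 == 2) ++ t.filter (fun y => y.1 == 3)))) ++ [] from by simp,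
        pvInsertBy_middle _ x _ _
          (fun a ha => by
            rcases List.mem_append.mp ha with h1 | h1
            · simp [hmem 0 a h1, hx]
            · rcases List.mem_append.mp h1 with h2 | h2
              · simp [hmem 1 a h2, hx]
              · rcases List.mem_append.mp h2 with h3 | h3
                · simp [hmem 2 a h3, hx]
                · simp [hmem 3 a h3, hx])
          (fun b hb => by simp at hb)]
      simp [List.filter_append, List.filter, hx]

theorem pvFilterMap_GA (q : String) (ns : List (List (String × String))) (k : Int) :
    ((ns.flatMap (pvGA q)).filter (fun x => x.1 == k)).map (fun s => s.2) =
      ns.flatMap (pvGB k q) := by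
  rw [List.filter_flatMap, List.map_flatMap]
  rfl

theorem pvMain (query : String) (graph : List (String × List (List (String × String)))) :
    search_nodes query graph = search_nodes_alt query graph := by
  unfold search_nodes search_nodes_alt
  by_cases hq : PySem.Str.strip (PySem.Str.lower query) = ""
  · simp [hq]
  · simp only [beq_iff_eq, hq, if_false]
    rw [pvFoldA, pvFoldB]
    simp only [List.nil_append]
    have hb : ∀ x ∈ ((PySem.Dict.get? ⟨graph⟩ "nodes").getD []).flatMap
        (pvGA (PySem.Str.strip (PySem.Str.lower query))), x.1 = 0 ∨ x.1 = 1 ∨ x.1 = 2 ∨ x.1 = 3 := by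
      intro x hx
      rcases List.mem_flatMap.mp hx with ⟨n, _, hn⟩
      exact pvGA_key _ n x hn
    rw [pvSort_buckets _ hb, PySem.List.slice_to _ (by norm_num), PySem.List.slice_to _ (by norm_num),
      List.map_take]
    simp only [List.map_append, pvFilterMap_GA, List.append_assoc]

-- ===== VERDICT (by name: the statement is the Claim_ definition above) =====
theorem search_nodes_spec : Claim_equal_search_nodes := by
  intro query graph _ _
  unfold Spec_search_nodes
  exact pvMain query graph
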